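-- pv_equiv track=rewrite | github.com/dic-case-studies/casa6 | casatestutils/casatestutils/imagerhelpers/imagetesthelpers.py | split_histories_by_task
-- ===== SOURCE A (Python) =====
-- def split_histories_by_task(history):
--     """
--     Given the list of strings in history, split it wherever there is a "taskname=*" line.
--     Return a dictionary where the keys are the "taskname=*" lines, and the values are all lines
--     for that taskname.
--     """
--     ret = {}
--     task_line = ""
--     for line in history:
--         if line.startswith("taskname="):
--             task_line = line
--         if task_line not in ret:
--             ret[task_line] = []
--         ret[task_line].append(line)
--     return ret
-- ===== SOURCE B (Python) =====
-- def split_histories_by_task(history):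
--     # Two-pass: cut history into contiguous blocks at "taskname=" boundaries,
--     # then merge the tagged blocks into the dict (duplicate tags coalesce).
--     blocks = []
--     key = ""
--     current = []
--     for line in history:
--         if line.startswith("taskname="):
--             if current:
--                 blocks.append((key, current))
--             key = line
--             current = []
--         current.append(line)
--     if current:
--         blocks.append((key, current))
--     ret = {}
--     for key, block in blocks:
--         ret.setdefault(key, []).extend(block)
--     return ret
-- ===== Notes on version B (the rewrite author's own statement) =====
-- stated objective: alternative
-- what changed: A builds the dict incrementally line by line with a running task_line key; B first segments the history into contiguous blocks at 'taskname=' boundary lines and then merges the tagged blocks into the dict with setdefault/extend, preserving key order and duplicate-key coalescing.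
import Mathlib
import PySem

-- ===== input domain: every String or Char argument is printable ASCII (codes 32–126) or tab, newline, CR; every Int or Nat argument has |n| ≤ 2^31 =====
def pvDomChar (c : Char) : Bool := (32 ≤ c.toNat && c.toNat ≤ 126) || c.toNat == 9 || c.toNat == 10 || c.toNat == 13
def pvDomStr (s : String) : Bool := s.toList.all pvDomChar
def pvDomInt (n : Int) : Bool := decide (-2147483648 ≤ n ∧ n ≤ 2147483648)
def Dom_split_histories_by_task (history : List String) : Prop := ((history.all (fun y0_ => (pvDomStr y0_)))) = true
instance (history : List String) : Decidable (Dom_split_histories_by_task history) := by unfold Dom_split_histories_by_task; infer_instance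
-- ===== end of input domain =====

-- B replaces A's single incremental per-line dict pass by a two-pass decomposition: first cut
-- the history into contiguous tagged blocks at "taskname=" boundaries, then merge the blocks
-- into the dict (objective: alternative; same value, same key order).

-- ===== PORT A =====
-- A's loop body: state = (ret dict, current task_line)
def pvAStep (st : PySem.Dict String (List String) × String) (line : String) :
    PySem.Dict String (List String) × String :=
  let task_line := if PySem.Str.startswith line "taskname=" then line else st.2
  let ret := if st.1.contains task_line then st.1 else st.1.insert task_line []
  (ret.modify task_line [] (fun l => l ++ [line]), task_line)

def split_histories_by_task (history : List String) : List (String × List String) :=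
  (history.foldl pvAStep (PySem.Dict.empty, "")).1.items

-- ===== PORT B =====
-- first pass of Source B: contiguous blocks, each tagged with its owning task line
def pvBlocks (key : String) (cur : List String) : List String → List (String × List String)
  | [] => if cur.isEmpty then [] else [(key, cur)]
  | line :: rest =>
    if PySem.Str.startswith line "taskname=" then
      if cur.isEmpty then pvBlocks line [line] rest
      else (key, cur) :: pvBlocks line [line] rest
    else pvBlocks key (cur ++ [line]) rest

-- second pass of Source B: ret.setdefault(key, []).extend(block)
def pvMerge (ret : PySem.Dict String (List String)) (kb : String × List String) :
    PySem.Dict String (List String) :=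
  ret.modify kb.1 [] (fun l => l ++ kb.2)

def split_histories_by_task_alt (history : List String) : List (String × List String) :=
  ((pvBlocks "" [] history).foldl pvMerge PySem.Dict.empty).items

-- ===== PRECONDITION & SPEC =====
def Spec_split_histories_by_task (history : List String) (out : List (String × List String)) : Prop := out = split_histories_by_task_alt history
instance (history : List String) (out : List (String × List String)) : Decidable (Spec_split_histories_by_task history out) := by unfold Spec_split_histories_by_task; infer_instance

-- ===== CLAIM (what is proved, stated in full; the proofs are below) =====
def Claim_equal_split_histories_by_task : Prop := ∀ (history : List String), Dom_split_histories_by_task history → Spec_split_histories_by_task history (split_histories_by_task history)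

-- ===== LEMMAS AND PROOFS =====

-- A's "insert-if-absent then append" equals one merge of a singleton block
theorem pvStepMerge (d : PySem.Dict String (List String)) (k : String) (v : String) :
    (if d.contains k then d else d.insert k []).modify k [] (fun l => l ++ [v]) =
      pvMerge d (k, [v]) := by
  by_cases h : d.contains k = true
  · simp [h, pvMerge]
  · have h' : d.contains k = false := by simpa using h
    simp only [h', Bool.false_eq_true, if_false, pvMerge, PySem.Dict.modify]
    rw [PySem.Dict.getD_insert_self, PySem.Dict.insert_insert_self,
        PySem.Dict.getD_of_not_contains _ _ h']

-- merging two blocks with the same key in a row = merging their concatenation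
theorem pvMergeMerge (d : PySem.Dict String (List String)) (k : String) (b c : List String) :
    pvMerge (pvMerge d (k, b)) (k, c) = pvMerge d (k, b ++ c) := by
  simp only [pvMerge, PySem.Dict.modify]
  rw [PySem.Dict.getD_insert_self, PySem.Dict.insert_insert_self, List.append_assoc]

-- the pending partial block of B's first pass, as a block list
def pvPartial (key : String) (cur : List String) : List (String × List String) :=
  if cur.isEmpty then [] else [(key, cur)]

-- main invariant: A's remaining fold, started from the dict holding all blocks merged so far,
-- computes the merge of the blocks B's first pass still produces
theorem pvMain (hist : List String) : ∀ (key : String) (cur : List String)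
    (d : PySem.Dict String (List String)),
    (hist.foldl pvAStep ((pvPartial key cur).foldl pvMerge d, key)).1 =
      (pvBlocks key cur hist).foldl pvMerge d := by
  induction hist with
  | nil => intro key cur d; simp only [List.foldl_nil, pvBlocks, pvPartial]
  | cons line rest ih =>
    intro key cur d
    by_cases hs : PySem.Str.startswith line "taskname=" = true
    · have hA : ∀ P : PySem.Dict String (List String), pvAStep (P, key) line =
          (pvMerge P (line, [line]), line) := by
        intro P
        simp only [pvAStep, hs, if_true]
        rw [pvStepMerge]
      by_cases hc : cur = []
      · subst hc
        simp only [List.foldl_cons, hA, pvBlocks, hs, if_true, List.isEmpty_nil,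
          pvPartial, List.foldl_nil]
        have := ih line [line] d
        simpa only [pvPartial, List.isEmpty_cons, Bool.false_eq_true, if_false,
          List.foldl_cons, List.foldl_nil] using this
      · have hc' : cur.isEmpty = false := by simpa using hc
        simp only [List.foldl_cons, hA, pvBlocks, hs, if_true, hc', Bool.false_eq_true,
          if_false, pvPartial, List.foldl_nil]
        have := ih line [line] (pvMerge d (key, cur))
        simpa only [pvPartial, List.isEmpty_cons, Bool.false_eq_true, if_false,
          List.foldl_cons, List.foldl_nil] using this
    · have hs' : PySem.Str.startswith line "taskname=" = false := by simpa using hs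
      have hA : ∀ P : PySem.Dict String (List String), pvAStep (P, key) line =
          (pvMerge P (key, [line]), key) := by
        intro P
        simp only [pvAStep, hs', Bool.false_eq_true, if_false]
        rw [pvStepMerge]
      have hmerge : pvMerge ((pvPartial key cur).foldl pvMerge d) (key, [line]) =
          (pvPartial key (cur ++ [line])).foldl pvMerge d := by
        by_cases hc : cur = []
        · subst hc
          simp only [pvPartial, List.isEmpty_nil, if_true, List.foldl_nil, List.nil_append,
            List.isEmpty_cons, Bool.false_eq_true, if_false, List.foldl_cons]
        · have hc' : cur.isEmpty = false := by simpa using hc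
          have hc2 : (cur ++ [line]).isEmpty = false := by simp
          simp only [pvPartial, hc', hc2, Bool.false_eq_true, if_false,
            List.foldl_cons, List.foldl_nil]
          exact pvMergeMerge d key cur [line]
      simp only [List.foldl_cons, hA, hmerge, pvBlocks, hs', Bool.false_eq_true, if_false]
      exact ih key (cur ++ [line]) d

-- ===== VERDICT (by name: the statement is the Claim_ definition above) =====
theorem split_histories_by_task_spec : Claim_equal_split_histories_by_task := by
  intro history _
  unfold Spec_split_histories_by_task split_histories_by_task split_histories_by_task_alt
  have := pvMain history "" [] PySem.Dict.empty
  simp only [pvPartial, List.isEmpty_nil, if_true, List.foldl_nil] at this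
  rw [this]
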